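-- pv_equiv track=rewrite | github.com/DozzzeN/SKG | chirpKey/perm3_x_complex_correct_ldpc.py | bytes_to_quartet
-- ===== SOURCE A (Python) =====
-- def bytes_to_quartet(byte_array):
--     quartet_array = []
--     current_byte = 0
--     bits_read = 0
--
--     for byte in byte_array:
--         current_byte = (current_byte << 8) | byte
--         bits_read += 8
--
--         while bits_read >= 2:
--             bits_read -= 2
--             quartet = (current_byte >> bits_read) & 0b11
--             quartet_array.append(quartet)
--
--     return quartet_array
-- ===== SOURCE B (Python) =====
-- def bytes_to_quartet(byte_array):
--     return [q for byte in byte_array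
--               for q in ((byte >> 6) & 3, (byte >> 4) & 3, (byte >> 2) & 3, byte & 3)]
-- ===== Notes on version B (the rewrite author's own statement) =====
-- stated objective: simpler
-- what changed: Replaced A's shift-register state (current_byte accumulator, bits_read counter, inner while loop) with a flat comprehension extracting each byte's four 2-bit quartets directly via (byte>>k)&3 for k=6,4,2,0.
import Mathlib
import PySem

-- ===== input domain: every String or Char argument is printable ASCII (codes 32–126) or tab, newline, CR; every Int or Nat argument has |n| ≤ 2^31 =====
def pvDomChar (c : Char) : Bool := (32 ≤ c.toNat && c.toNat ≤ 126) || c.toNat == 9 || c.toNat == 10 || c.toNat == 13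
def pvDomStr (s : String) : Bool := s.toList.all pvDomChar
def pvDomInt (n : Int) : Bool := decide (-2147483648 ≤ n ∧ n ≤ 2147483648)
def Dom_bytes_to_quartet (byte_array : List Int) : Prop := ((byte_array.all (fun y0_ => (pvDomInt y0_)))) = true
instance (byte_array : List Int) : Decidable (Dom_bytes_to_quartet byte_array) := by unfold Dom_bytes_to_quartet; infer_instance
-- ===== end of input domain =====

-- B drops A's shift-register accumulator and inner while loop: each byte independently
-- yields its four 2-bit quartets high-to-low (simpler, flat control flow; identical output).

-- ===== PORT A =====
-- the inner 'while bits_read >= 2' loop of A, literally: state (current_byte fixed, bits_read, quartet_array)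
def pvInnerA (current_byte : Int) (bits_read : Int) (quartet_array : List Int) : Int × List Int :=
  if 2 ≤ bits_read then
    pvInnerA current_byte (bits_read - 2)
      (quartet_array ++ [PySem.Int.band (current_byte >>> (bits_read - 2).toNat) 3])
  else (bits_read, quartet_array)
termination_by bits_read.toNat
decreasing_by omega

-- the body of A's 'for byte in byte_array' loop
def pvStepA (st : Int × Int × List Int) (byte : Int) : Int × Int × List Int :=
  let current_byte := PySem.Int.bor (st.1 <<< (8:Nat)) byte
  let bits_read := st.2.1 + 8
  let r := pvInnerA current_byte bits_read st.2.2
  (current_byte, r.1, r.2)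

def bytes_to_quartet (byte_array : List Int) : List Int :=
  (byte_array.foldl pvStepA ((0:Int), (0:Int), ([] : List Int))).2.2

-- ===== PORT B =====
def bytes_to_quartet_alt (byte_array : List Int) : List Int :=
  byte_array.flatMap (fun (byte : Int) =>
    [PySem.Int.band (byte >>> (6:Nat)) 3, PySem.Int.band (byte >>> (4:Nat)) 3,
     PySem.Int.band (byte >>> (2:Nat)) 3, PySem.Int.band byte 3])

-- ===== PRECONDITION & SPEC =====
def Spec_bytes_to_quartet (byte_array : List Int) (out : List Int) : Prop := out = bytes_to_quartet_alt byte_array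
instance (byte_array : List Int) (out : List Int) : Decidable (Spec_bytes_to_quartet byte_array out) := by unfold Spec_bytes_to_quartet; infer_instance

-- ===== CLAIM (what is proved, stated in full; the proofs are below) =====
def Claim_equal_bytes_to_quartet : Prop := ∀ (byte_array : List Int), Dom_bytes_to_quartet byte_array → Spec_bytes_to_quartet byte_array (bytes_to_quartet byte_array)

-- ===== LEMMAS AND PROOFS =====

-- testBit of x % 256 in terms of testBit of x
theorem pv_mod256_testBit (x i : Nat) : (x % 256).testBit i = (decide (i < 8) && x.testBit i) := by
  have h := Nat.testBit_mod_two_pow x 8 i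
  norm_num at h; exact h

-- low 8 bits of a Nat with p % 256 = 0 are all 0
theorem pv_tb_zero {p : Nat} (h : p % 256 = 0) {i : Nat} (hi : i < 8) : p.testBit i = false := by
  have hm := pv_mod256_testBit p i
  rw [h] at hm
  simpa [hi] using hm.symm

-- low 8 bits of a Nat with p % 256 = 255 are all 1
theorem pv_tb_one {p : Nat} (h : p % 256 = 255) {i : Nat} (hi : i < 8) : p.testBit i = true := by
  have hm := pv_mod256_testBit p i
  rw [h] at hm
  have h255 : Nat.testBit 255 i = decide (i < 8) := by
    have := Nat.testBit_two_pow_sub_one 8 i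
    norm_num at this; exact this
  rw [h255] at hm
  simpa [hi] using hm.symm

theorem pv_or_lo {m : Nat} (h : m % 256 = 0) (n : Nat) : (m ||| n) % 256 = n % 256 := by
  apply Nat.eq_of_testBit_eq
  intro i
  rw [pv_mod256_testBit, pv_mod256_testBit, Nat.testBit_or]
  by_cases hi : i < 8
  · simp [hi, pv_tb_zero h hi]
  · simp [hi]

theorem pv_and_zero {m : Nat} (h : m % 256 = 0) (n : Nat) : (n &&& m) % 256 = 0 := by
  apply Nat.eq_of_testBit_eq
  intro i
  rw [pv_mod256_testBit, Nat.testBit_and]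
  by_cases hi : i < 8
  · simp [pv_tb_zero h hi]
  · simp [hi]

theorem pv_and_ones {p : Nat} (h : p % 256 = 255) (n : Nat) : (p &&& n) % 256 = n % 256 := by
  apply Nat.eq_of_testBit_eq
  intro i
  rw [pv_mod256_testBit, pv_mod256_testBit, Nat.testBit_and]
  by_cases hi : i < 8
  · simp [hi, pv_tb_one h hi]
  · simp [hi]

-- ORing in bits at position ≥ 8 does not change the value mod 256
theorem pv_bor_mod (c b : Int) : PySem.Int.bor (c <<< (8:Nat)) b % 256 = b % 256 := by
  have hm : c <<< (8:Nat) = 256 * c := by simp [Int.shiftLeft_eq]; ring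
  rw [hm]
  unfold PySem.Int.bor
  split_ifs with h1 h2 h2
  · have h0 : (256 * c).toNat % 256 = 0 := by omega
    have := pv_or_lo h0 b.toNat
    omega
  · have h0 : (256 * c).toNat % 256 = 0 := by omega
    have h3 := pv_and_zero h0 (-b - 1).toNat
    have h4 := Nat.and_le_left (n := (-b - 1).toNat) (m := (256 * c).toNat)
    omega
  · have h0 : (-(256 * c) - 1).toNat % 256 = 255 := by omega
    have h3 := pv_and_ones h0 b.toNat
    have h4 := Nat.and_le_left (n := (-(256 * c) - 1).toNat) (m := b.toNat)
    omega
  · have h0 : (-(256 * c) - 1).toNat % 256 = 255 := by omega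
    have h3 := pv_and_ones h0 (-b - 1).toNat
    omega

-- a & 3 = a mod 4 (Python semantics, any sign)
theorem pv_band3 (a : Int) : PySem.Int.band a 3 = a % 4 := by
  have hnat : ∀ x : Nat, x &&& 3 = x % 4 := by
    intro x
    have := Nat.and_two_pow_sub_one_eq_mod x 2
    norm_num at this; exact this
  unfold PySem.Int.band
  split_ifs with h1 h2 h2 <;> [skip; omega; skip; omega]
  · have h3 : (3:Int).toNat = 3 := rfl
    rw [h3, hnat a.toNat]
    omega
  · have h3 : (3:Int).toNat = 3 := rfl
    rw [h3, Nat.and_comm, hnat (-a - 1).toNat]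
    omega

-- the four quartets extracted from current_byte depend only on byte (mod 256)
theorem pv_quart (c b : Int) (k : Nat) (hk : k = 0 ∨ k = 2 ∨ k = 4 ∨ k = 6) :
    PySem.Int.band (PySem.Int.bor (c <<< (8:Nat)) b >>> k) 3 = PySem.Int.band (b >>> k) 3 := by
  have h := pv_bor_mod c b
  rw [pv_band3, pv_band3, Int.shiftRight_eq_div_pow, Int.shiftRight_eq_div_pow]
  rcases hk with hk | hk | hk | hk <;> subst hk <;> norm_num <;> omega

-- unfolding A's inner loop from bits_read = 8: exactly four quartets, bits_read ends at 0
theorem pv_inner8 (X : Int) (acc : List Int) :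
    pvInnerA X 8 acc =
      (0, acc ++ [PySem.Int.band (X >>> (6:Nat)) 3, PySem.Int.band (X >>> (4:Nat)) 3,
                  PySem.Int.band (X >>> (2:Nat)) 3, PySem.Int.band (X >>> (0:Nat)) 3]) := by
  rw [pvInnerA]; norm_num
  rw [pvInnerA]; norm_num
  rw [pvInnerA]; norm_num
  rw [pvInnerA]; norm_num
  rw [pvInnerA]; norm_num
  exact ⟨rfl, rfl, rfl⟩

-- fold invariant: bits_read is 0 before each byte, and the output extends acc by B's quartets
theorem pv_fold (bs : List Int) : ∀ (c : Int) (acc : List Int),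
    bs.foldl pvStepA (c, (0:Int), acc) =
      ((bs.foldl pvStepA (c, (0:Int), acc)).1, 0, acc ++ bytes_to_quartet_alt bs) := by
  induction bs with
  | nil => intro c acc; simp [bytes_to_quartet_alt]
  | cons b bs ih =>
    intro c acc
    have hstep : pvStepA (c, (0:Int), acc) b =
        (PySem.Int.bor (c <<< (8:Nat)) b, 0,
          acc ++ [PySem.Int.band (b >>> (6:Nat)) 3, PySem.Int.band (b >>> (4:Nat)) 3,
                  PySem.Int.band (b >>> (2:Nat)) 3, PySem.Int.band b 3]) := by
      show (_, (pvInnerA _ (0 + 8) acc).1, (pvInnerA _ (0 + 8) acc).2) = _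
      rw [(by norm_num : (0:Int) + 8 = 8), pv_inner8]
      rw [pv_quart c b 6 (by tauto), pv_quart c b 4 (by tauto), pv_quart c b 2 (by tauto),
          pv_quart c b 0 (by tauto)]
      simp [Int.shiftRight_eq_div_pow]
    simp only [List.foldl_cons, hstep]
    rw [ih]
    simp [bytes_to_quartet_alt, List.append_assoc]

-- ===== VERDICT (by name: the statement is the Claim_ definition above) =====
theorem bytes_to_quartet_spec : Claim_equal_bytes_to_quartet := by
  intro byte_array _
  unfold Spec_bytes_to_quartet bytes_to_quartet
  rw [pv_fold byte_array 0 []]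
  simp
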